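-- pv_equiv track=rewrite | github.com/glimpse500/DBMS | Table.py | __createTurple
-- ===== SOURCE A (Python) =====
-- def __createTurple(attributes,turple1,turple2):
--     dictionary = {}
--     for key in turple1:
--         dictionary[key] = turple1[key]
--     for key in turple2:
--         if key not in dictionary:
--             dictionary[key] = turple2[key]
--     newTurple = []
--     for attribute in attributes:
--         newTurple.insert(len(newTurple),dictionary[attribute])
--     return newTurple
-- ===== SOURCE B (Python) =====
-- def __createTurple(attributes, turple1, turple2):
--     # Project directly over attributes: first-wins lookup in turple1, fall back
--     # to turple2; no intermediate merged dictionary is built.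
--     return [turple1[a] if a in turple1 else turple2[a] for a in attributes]
-- ===== Notes on version B (the rewrite author's own statement) =====
-- stated objective: simpler
-- what changed: B builds no merged dictionary at all: it projects in a single comprehension over attributes, looking each attribute up in turple1 first and falling back to turple2, instead of A's merge-two-dicts-then-project loops.
import Mathlib
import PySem

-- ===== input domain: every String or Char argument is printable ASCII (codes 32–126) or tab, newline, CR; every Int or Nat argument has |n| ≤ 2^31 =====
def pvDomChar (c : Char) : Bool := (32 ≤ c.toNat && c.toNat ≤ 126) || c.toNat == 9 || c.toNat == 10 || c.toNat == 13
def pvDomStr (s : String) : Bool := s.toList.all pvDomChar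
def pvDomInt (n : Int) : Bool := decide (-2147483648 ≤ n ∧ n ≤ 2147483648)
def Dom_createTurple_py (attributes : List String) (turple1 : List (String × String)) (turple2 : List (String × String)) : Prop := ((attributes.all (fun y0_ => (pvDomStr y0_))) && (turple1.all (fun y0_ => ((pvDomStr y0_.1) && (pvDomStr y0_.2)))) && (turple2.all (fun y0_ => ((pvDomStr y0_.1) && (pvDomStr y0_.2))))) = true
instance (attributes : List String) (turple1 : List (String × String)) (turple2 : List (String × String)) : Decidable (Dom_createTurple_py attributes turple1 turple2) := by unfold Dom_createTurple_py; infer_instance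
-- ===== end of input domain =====

-- B removes A's merge-then-project: it projects each attribute directly (turple1 first,
-- fallback turple2) with no intermediate merged dictionary; same return values (objective: simpler).


-- ===== PORT A =====
-- dictionary = {}; for key in turple1: dictionary[key] = turple1[key];
-- for key in turple2: if key not in dictionary: dictionary[key] = turple2[key];
-- then project attributes (dictionary[attribute]; KeyError excluded by Pre_, the port
-- uses getD "" there).
def pyDictMerge (turple1 turple2 : List (String × String)) : PySem.Dict String String :=
  turple2.foldl (fun d kv => if d.contains kv.1 then d else d.insert kv.1 kv.2)
    (turple1.foldl (fun d kv => d.insert kv.1 kv.2) PySem.Dict.empty)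

def createTurple_py (attributes : List String) (turple1 : List (String × String)) (turple2 : List (String × String)) : List String :=
  attributes.foldl (fun newTurple attr => newTurple ++ [((pyDictMerge turple1 turple2).get? attr).getD ""]) []

-- ===== PORT B =====
-- return [turple1[a] if a in turple1 else turple2[a] for a in attributes]
-- (turple1/turple2 are the dict arguments themselves, read as PySem.Dict.mk; dict access
-- ported as get? with getD "", the KeyError case excluded by Pre_).
def createTurple_py_alt (attributes : List String) (turple1 : List (String × String)) (turple2 : List (String × String)) : List String :=
  attributes.map (fun a =>
    if (PySem.Dict.mk turple1).contains a then ((PySem.Dict.mk turple1).get? a).getD ""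
    else ((PySem.Dict.mk turple2).get? a).getD "")

-- ===== PRECONDITION & SPEC =====
-- Pre_ excludes (i) attributes present in neither dict, on which A raises KeyError, and
-- (ii) association lists whose turple1 keys are not distinct, which do not represent any
-- Python dict argument (dict keys are unique).
def Pre_createTurple_py (attributes : List String) (turple1 : List (String × String)) (turple2 : List (String × String)) : Prop :=
  (∀ a ∈ attributes, a ∈ turple1.map Prod.fst ∨ a ∈ turple2.map Prod.fst) ∧
  (turple1.map Prod.fst).Nodup
instance (attributes : List String) (turple1 : List (String × String)) (turple2 : List (String × String)) : Decidable (Pre_createTurple_py attributes turple1 turple2) := by unfold Pre_createTurple_py; infer_instance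

def pvWitness_createTurple_py : List String × (List (String × String)) × (List (String × String)) :=
  (["x", "y"], [("x", "1")], [("y", "2"), ("x", "9")])

def Spec_createTurple_py (attributes : List String) (turple1 : List (String × String)) (turple2 : List (String × String)) (out : List String) : Prop := out = createTurple_py_alt attributes turple1 turple2
instance (attributes : List String) (turple1 : List (String × String)) (turple2 : List (String × String)) (out : List String) : Decidable (Spec_createTurple_py attributes turple1 turple2 out) := by unfold Spec_createTurple_py; infer_instance

-- ===== CLAIM (what is proved, stated in full; the proofs are below) =====
def Claim_equal_createTurple_py : Prop := ∀ (attributes : List String) (turple1 : List (String × String)) (turple2 : List (String × String)), Dom_createTurple_py attributes turple1 turple2 → Pre_createTurple_py attributes turple1 turple2 → Spec_createTurple_py attributes turple1 turple2 (createTurple_py attributes turple1 turple2)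

-- ===== LEMMAS AND PROOFS =====

-- A's append-at-end projection loop is a map.
theorem pv_foldl_append_map {α β : Type} (f : α → β) (l : List α) (acc : List β) :
    l.foldl (fun acc a => acc ++ [f a]) acc = acc ++ l.map f := by
  induction l generalizing acc with
  | nil => simp
  | cons x xs ih => simp [List.foldl, ih]

-- A's unconditional insert loop over a duplicate-free association list looks up as Dict.mk.
theorem pv_fold_insert_get? (l : List (String × String)) (hl : (l.map Prod.fst).Nodup)
    (d : PySem.Dict String String) (a : String) :
    (l.foldl (fun d kv => d.insert kv.1 kv.2) d).get? a =
      ((PySem.Dict.mk l).get? a).or (d.get? a) := by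
  induction l generalizing d with
  | nil => simp [PySem.Dict.get?]
  | cons kv rest ih =>
    obtain ⟨k, v⟩ := kv
    simp only [List.map_cons, List.nodup_cons] at hl
    simp only [List.foldl, PySem.Dict.get?_mk_cons]
    rw [ih hl.2]
    by_cases hak : k = a
    · subst hak
      have hnone : (PySem.Dict.mk rest).get? k = none := by
        rw [PySem.Dict.get?_eq_none_iff_not_mem_keys]
        simpa [PySem.Dict.keys_mk] using hl.1
      simp [hnone, PySem.Dict.get?_insert_self]
    · have hka : ¬a = k := fun h => hak h.symm
      simp [beq_iff_eq, hak, hka, PySem.Dict.get?_insert]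

-- A's guarded insert loop (first occurrence wins) looks up as Dict.mk; no Nodup needed.
theorem pv_fold_guard_get? (l : List (String × String))
    (d : PySem.Dict String String) (a : String) :
    (l.foldl (fun d kv => if d.contains kv.1 then d else d.insert kv.1 kv.2) d).get? a =
      if d.contains a then d.get? a else (PySem.Dict.mk l).get? a := by
  induction l generalizing d with
  | nil =>
    by_cases h : d.contains a
    · simp [h, PySem.Dict.get?]
    · have hd : d.get? a = none := by
        rw [PySem.Dict.contains_eq_isSome_get?] at h
        cases hg : d.get? a <;> simp [hg] at h ⊢
      have hm : (PySem.Dict.mk ([] : List (String × String))).get? a = none := rfl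
      simp [h, hd, hm]
  | cons kv rest ih =>
    obtain ⟨k, v⟩ := kv
    simp only [List.foldl, PySem.Dict.get?_mk_cons]
    by_cases hck : d.contains k
    · rw [if_pos hck, ih]
      by_cases hak : k = a
      · subst hak; simp [hck]
      · simp [beq_iff_eq, hak]
    · rw [if_neg hck, ih]
      by_cases hak : k = a
      · subst hak
        have : d.get? k = none := by
          rw [PySem.Dict.contains_eq_isSome_get?] at hck
          cases h : d.get? k <;> simp [h] at hck ⊢
        simp [hck, PySem.Dict.get?_insert_self, PySem.Dict.contains_eq_isSome_get?]
      · have hka : ¬a = k := fun h => hak h.symm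
        have hc' : (d.insert k v).contains a = d.contains a := by
          simp [PySem.Dict.contains_insert, beq_iff_eq, hka]
        rw [hc']
        simp [beq_iff_eq, hak, hka, PySem.Dict.get?_insert]

theorem createTurple_py_eq (attributes : List String) (turple1 turple2 : List (String × String))
    (hpre : Pre_createTurple_py attributes turple1 turple2) :
    createTurple_py attributes turple1 turple2 = createTurple_py_alt attributes turple1 turple2 := by
  obtain ⟨-, hnd⟩ := hpre
  unfold createTurple_py createTurple_py_alt pyDictMerge
  rw [pv_foldl_append_map]
  simp only [List.nil_append]
  apply List.map_congr_left
  intro a _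
  rw [pv_fold_guard_get?]
  have hfold : (turple1.foldl (fun d kv => d.insert kv.1 kv.2) PySem.Dict.empty).get? a =
      (PySem.Dict.mk turple1).get? a := by
    rw [pv_fold_insert_get? turple1 hnd PySem.Dict.empty a, PySem.Dict.get?_empty,
      Option.or_none]
  rw [PySem.Dict.contains_eq_isSome_get?, PySem.Dict.contains_eq_isSome_get?, hfold]
  cases h1 : (PySem.Dict.mk turple1).get? a <;> simp

-- ===== VERDICT (by name: the statement is the Claim_ definition above) =====
theorem createTurple_py_spec : Claim_equal_createTurple_py := by
  intro attributes turple1 turple2 _ hpre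
  unfold Spec_createTurple_py
  exact createTurple_py_eq attributes turple1 turple2 hpre
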